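-- pv_equiv track=rewrite | github.com/gilyoungCoder/siml | 3_classification_sd1.4TC/checkCos/check.py | find_subseq
-- ===== SOURCE A (Python) =====
-- from typing import List, Optional, Dict, Tuple
--
-- def find_subseq(long: List[int], short: List[int]) -> Optional[Tuple[int, int]]:
--     """long에서 short 서브시퀀스(연속) 최초 매치를 찾아 (start, end) 반환. 없으면 None."""
--     n, m = len(long), len(short)
--     if m == 0 or m > n:
--         return None
--     for i in range(n - m + 1):
--         if long[i:i+m] == short:
--             return i, i + m  # [start, end)
--     return None
-- ===== SOURCE B (Python) =====
-- def find_subseq(long, short):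
--     """long에서 short 서브시퀀스(연속) 최초 매치를 찾아 (start, end) 반환. 없으면 None."""
--     n, m = len(long), len(short)
--     if m == 0 or m > n:
--         return None
--     MOD = (1 << 61) - 1
--     BASE = 1 << 32
--
--     def phash(seq):
--         h = 0
--         for v in seq:
--             h = (h * BASE + v) % MOD
--         return h
--
--     hs = phash(short)
--     pw = pow(BASE, m - 1, MOD)   # BASE^(m-1) mod MOD
--     h = phash(long[:m])          # rolling hash of the current window long[i:i+m]
--     for i in range(n - m + 1):
--         if h == hs and long[i:i+m] == short:
--             return i, i + m
--         if i + m < n: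
--             h = ((h - long[i] * pw) * BASE + long[i + m]) % MOD
--     return None
-- ===== Notes on version B (the rewrite author's own statement) =====
-- stated objective: alternative
-- what changed: B is a Rabin-Karp search: it maintains a rolling polynomial hash of the current window and compares the slice only at positions where the window hash equals the pattern hash, instead of A's slice comparison at every start index.
import Mathlib
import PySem

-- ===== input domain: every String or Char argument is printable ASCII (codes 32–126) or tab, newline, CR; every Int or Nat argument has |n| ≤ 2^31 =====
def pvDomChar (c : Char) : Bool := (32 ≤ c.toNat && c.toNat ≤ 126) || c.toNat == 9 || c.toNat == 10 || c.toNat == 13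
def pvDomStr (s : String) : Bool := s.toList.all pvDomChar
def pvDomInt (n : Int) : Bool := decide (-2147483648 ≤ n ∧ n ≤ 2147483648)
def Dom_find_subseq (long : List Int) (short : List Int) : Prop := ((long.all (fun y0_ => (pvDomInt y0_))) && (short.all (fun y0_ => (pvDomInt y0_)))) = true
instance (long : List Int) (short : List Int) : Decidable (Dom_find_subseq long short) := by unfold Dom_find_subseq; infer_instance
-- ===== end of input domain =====

-- B is a Rabin–Karp search (rolling polynomial hash; the slice is compared only where the
-- window hash equals the pattern hash) instead of A's slice comparison at every start index.

-- ===== PORT A =====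
-- A's 'for i in range(n - m + 1)' loop: i is the counter, the first Nat is the number of
-- remaining iterations (initially n - m + 1)
def pvALoop (long short : List Int) (m : Nat) : Nat → Nat → Option (Int × Int)
  | 0, _ => none
  | fuel + 1, i =>
    if PySem.List.slice long (some (i : Int)) (some ((i : Int) + (m : Int))) = short then
      some ((i : Int), (i : Int) + (m : Int))
    else pvALoop long short m fuel (i + 1)

def find_subseq (long : List Int) (short : List Int) : Option (Int × Int) :=
  let n := long.length
  let m := short.length
  if m = 0 ∨ m > n then none
  else pvALoop long short m (n - m + 1) 0

-- ===== PORT B =====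
-- B's constants MOD = 2^61 - 1 and BASE = 2^32
def pvP : Int := 2305843009213693951
def pvBase : Int := 4294967296

-- B's helper phash: left fold of h := (h * BASE + v) % MOD (Python '%' with a positive
-- modulus is PySem.Int.mod = Int.emod here)
def pvHash (l : List Int) : Int := l.foldl (fun h v => PySem.Int.mod (h * pvBase + v) pvP) 0

-- B's 'for i in range(n - m + 1)' loop carrying the rolling hash h of long[i:i+m]
def pvBLoop (long short : List Int) (hs pw : Int) (m n : Nat) : Nat → Nat → Int → Option (Int × Int)
  | 0, _, _ => none
  | fuel + 1, i, h =>
    if h = hs ∧ PySem.List.slice long (some (i : Int)) (some ((i : Int) + (m : Int))) = short then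
      some ((i : Int), (i : Int) + (m : Int))
    else
      let h' := if i + m < n then
          PySem.Int.mod ((h - long.getD i 0 * pw) * pvBase + long.getD (i + m) 0) pvP
        else h
      pvBLoop long short hs pw m n fuel (i + 1) h'

def find_subseq_alt (long : List Int) (short : List Int) : Option (Int × Int) :=
  let n := long.length
  let m := short.length
  if m = 0 ∨ m > n then none
  else
    let hs := pvHash short
    -- pow(BASE, m-1, MOD), ported by its contract
    let pw := PySem.Int.mod (pvBase ^ (m - 1)) pvP
    let h := pvHash (PySem.List.slice long none (some (m : Int)))   -- phash(long[:m])
    pvBLoop long short hs pw m n (n - m + 1) 0 h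

-- ===== PRECONDITION & SPEC =====
def Spec_find_subseq (long : List Int) (short : List Int) (out : Option (Int × Int)) : Prop := out = find_subseq_alt long short
instance (long : List Int) (short : List Int) (out : Option (Int × Int)) : Decidable (Spec_find_subseq long short out) := by unfold Spec_find_subseq; infer_instance

-- ===== CLAIM (what is proved, stated in full; the proofs are below) =====
def Claim_equal_find_subseq : Prop := ∀ (long : List Int) (short : List Int), Dom_find_subseq long short → Spec_find_subseq long short (find_subseq long short)

-- ===== LEMMAS AND PROOFS =====

-- the exact (un-reduced) polynomial value of a list
def pvE (l : List Int) (h : Int) : Int := l.foldl (fun h v => h * pvBase + v) h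

theorem pvMod_eq_emod (x : Int) : PySem.Int.mod x pvP = x % pvP :=
  PySem.Int.mod_eq_emod_of_pos (by norm_num [pvP])

theorem pvE_shift (l : List Int) : ∀ h, pvE l h = h * pvBase ^ l.length + pvE l 0 := by
  induction l with
  | nil => intro h; simp [pvE]
  | cons a t ih =>
    intro h
    show pvE t (h * pvBase + a) = h * pvBase ^ (t.length + 1) + pvE t (0 * pvBase + a)
    rw [ih (h * pvBase + a), ih (0 * pvBase + a)]
    ring

theorem pvHash_eq_mod (l : List Int) : pvHash l = pvE l 0 % pvP := by
  suffices h : ∀ x : Int,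
      l.foldl (fun h v => PySem.Int.mod (h * pvBase + v) pvP) (x % pvP) = pvE l x % pvP by
    have := h 0; simpa [pvHash] using this
  induction l with
  | nil => intro x; simp [pvE]
  | cons a t ih =>
    intro x
    show t.foldl _ (PySem.Int.mod (x % pvP * pvBase + a) pvP) = pvE t (x * pvBase + a) % pvP
    rw [pvMod_eq_emod]
    have hm : (x % pvP * pvBase + a) % pvP = (x * pvBase + a) % pvP := by
      have h1 : x % pvP ≡ x [ZMOD pvP] := Int.emod_emod_of_dvd x dvd_rfl
      exact (h1.mul_right pvBase).add_right a
    rw [hm]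
    exact ih (x * pvBase + a)

theorem pvE_append_singleton (l : List Int) (b : Int) : pvE (l ++ [b]) 0 = pvE l 0 * pvBase + b := by
  simp [pvE, List.foldl_append]

theorem pvE_cons (a : Int) (t : List Int) : pvE (a :: t) 0 = a * pvBase ^ t.length + pvE t 0 := by
  show pvE t (0 * pvBase + a) = _
  rw [pvE_shift]; ring

-- the rolling update: from the hash of window i to the hash of window i+1
theorem pvRoll (long : List Int) (m i : Nat) (hm : 0 < m) (hin : i + m < long.length) :
    pvHash ((long.drop (i + 1)).take m)
      = PySem.Int.mod ((pvHash ((long.drop i).take m) - long.getD i 0 * PySem.Int.mod (pvBase ^ (m - 1)) pvP) * pvBase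
          + long.getD (i + m) 0) pvP := by
  have hi : i < long.length := by omega
  have him : i + m < long.length := hin
  obtain ⟨m', rfl⟩ : ∃ m', m = m' + 1 := ⟨m - 1, by omega⟩
  -- window i = long[i] :: t, window (i+1) = t ++ [long[i+m]], t = take m' (drop (i+1) long)
  set t := (long.drop (i + 1)).take m' with ht
  have hdlen : m' + 1 ≤ (long.drop (i + 1)).length := by simp; omega
  have hw : (long.drop i).take (m' + 1) = long[i] :: t := by
    rw [← List.getElem_cons_drop hi, List.take_succ_cons]
  have hw' : (long.drop (i + 1)).take (m' + 1) = t ++ [long[i + m' + 1]] := by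
    rw [List.take_add_one]
    congr 1
    have : (long.drop (i + 1))[m']? = some long[i + m' + 1] := by
      rw [List.getElem?_drop, show i + 1 + m' = i + m' + 1 from by omega]
      exact List.getElem?_eq_getElem (by omega)
    simp [this]
  have htlen : t.length = m' := by simp [ht]; omega
  have hga : long.getD i 0 = long[i] := List.getD_eq_getElem long 0 hi
  have hgb : long.getD (i + (m' + 1)) 0 = long[i + m' + 1] := by
    have := List.getD_eq_getElem long 0 him
    simpa [show i + (m' + 1) = i + m' + 1 by omega] using this
  rw [show i + (m' + 1) = i + m' + 1 from by omega] at *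
  rw [hw, hw', hga, hgb]
  rw [pvHash_eq_mod, pvHash_eq_mod, pvE_append_singleton, pvE_cons, htlen]
  rw [pvMod_eq_emod, pvMod_eq_emod]
  have h1 : pvBase ^ m' % pvP ≡ pvBase ^ m' [ZMOD pvP] := Int.emod_emod_of_dvd _ dvd_rfl
  have h2 : (long[i] * pvBase ^ m' + pvE t 0) % pvP ≡ long[i] * pvBase ^ m' + pvE t 0 [ZMOD pvP] :=
    Int.emod_emod_of_dvd _ dvd_rfl
  have h3 : ((long[i] * pvBase ^ m' + pvE t 0) % pvP - long[i] * (pvBase ^ m' % pvP)) * pvBase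
        + long[i + m' + 1]
      ≡ ((long[i] * pvBase ^ m' + pvE t 0) - long[i] * pvBase ^ m') * pvBase + long[i + m' + 1]
        [ZMOD pvP] :=
    ((h2.sub (h1.mul_left long[i])).mul_right pvBase).add_right _
  rw [show m' + 1 - 1 = m' from rfl]
  calc (pvE t 0 * pvBase + long[i + m' + 1]) % pvP
      = (((long[i] * pvBase ^ m' + pvE t 0) - long[i] * pvBase ^ m') * pvBase + long[i + m' + 1]) % pvP := by
        ring_nf
    _ = _ := h3.symm

-- window = short forces hash = pattern hash
theorem pvHash_of_eq {w short : List Int} (h : w = short) : pvHash w = pvHash short := by rw [h]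

-- main loop equivalence
theorem pvLoop_eq (long short : List Int) (m : Nat) (hm : m = short.length) (h1 : 0 < m)
    (hmn : m ≤ long.length) :
    ∀ fuel i h, i + fuel = long.length - m + 1 →
      h = pvHash ((long.drop i).take m) →
      pvALoop long short m fuel i
        = pvBLoop long short (pvHash short) (PySem.Int.mod (pvBase ^ (m - 1)) pvP) m long.length fuel i h := by
  intro fuel
  induction fuel with
  | zero => intro i h _ _; rfl
  | succ fuel ih =>
    intro i h hif hinv
    rw [pvALoop, pvBLoop]
    have hslice : PySem.List.slice long (some (i : Int)) (some ((i : Int) + (m : Int)))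
        = (long.drop i).take m := PySem.List.slice_natCast_add ..
    by_cases hs : (long.drop i).take m = short
    · rw [if_pos (by rw [hslice]; exact hs), if_pos ⟨by rw [hinv]; exact pvHash_of_eq hs, by rw [hslice]; exact hs⟩]
    · rw [if_neg (by rw [hslice]; exact hs), if_neg (by rw [hslice]; rintro ⟨_, h2⟩; exact hs h2)]
      by_cases hlt : i + m < long.length
      · rw [if_pos hlt]
        exact ih (i + 1) _ (by omega) (by rw [hinv, pvRoll long m i h1 hlt])
      · -- last position: fuel must be 0, both loops return none
        have : fuel = 0 := by omega
        subst this
        rfl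

-- ===== VERDICT (by name: the statement is the Claim_ definition above) =====
theorem find_subseq_spec : Claim_equal_find_subseq := by
  intro long short _
  unfold Spec_find_subseq find_subseq find_subseq_alt
  by_cases h : short.length = 0 ∨ short.length > long.length
  · simp only [h, if_pos]
  · simp only [h, if_false]
    rw [not_or] at h
    obtain ⟨ha, hb⟩ := h
    refine pvLoop_eq long short short.length rfl (by omega) (by omega) _ 0 _ (by omega) ?_
    rw [PySem.List.slice_to_natCast]
    simp
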